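-- pv_equiv track=rewrite | github.com/murderoch/thesis | V0.2/test.py | addShell
-- ===== SOURCE A (Python) =====
-- def addShell(oldShell, E, subShells, noElectrons):
--     if E >= noElectrons:
--         return oldShell
--     else:
--         for subShell in subShells:
--             if not subShell in oldShell:
--                 if E + subShell[2] <= noElectrons:
--                     oldShell.append(subShell)
--                     E = E + subShell[2]
--                     oldShell = addShell(oldShell, E, subShells, noElectrons)
--                     return oldShell
-- ===== SOURCE B (Python) =====
-- def addShell(oldShell, E, subShells, noElectrons):
--     # Iterative version: repeatedly take the first eligible subshell; mutates oldShell in place like A.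
--     while E < noElectrons:
--         pick = next((s for s in subShells
--                      if s not in oldShell and E + s[2] <= noElectrons), None)
--         if pick is None:
--             return None
--         oldShell.append(pick)
--         E += pick[2]
--     return oldShell
-- ===== Notes on version B (the rewrite author's own statement) =====
-- stated objective: simpler
-- what changed: Replaced A's tail recursion (for loop whose body recurses and returns) by an iterative while loop that each round finds the first eligible subshell with next() and appends it, returning None when no subshell is eligible.
import Mathlib
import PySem

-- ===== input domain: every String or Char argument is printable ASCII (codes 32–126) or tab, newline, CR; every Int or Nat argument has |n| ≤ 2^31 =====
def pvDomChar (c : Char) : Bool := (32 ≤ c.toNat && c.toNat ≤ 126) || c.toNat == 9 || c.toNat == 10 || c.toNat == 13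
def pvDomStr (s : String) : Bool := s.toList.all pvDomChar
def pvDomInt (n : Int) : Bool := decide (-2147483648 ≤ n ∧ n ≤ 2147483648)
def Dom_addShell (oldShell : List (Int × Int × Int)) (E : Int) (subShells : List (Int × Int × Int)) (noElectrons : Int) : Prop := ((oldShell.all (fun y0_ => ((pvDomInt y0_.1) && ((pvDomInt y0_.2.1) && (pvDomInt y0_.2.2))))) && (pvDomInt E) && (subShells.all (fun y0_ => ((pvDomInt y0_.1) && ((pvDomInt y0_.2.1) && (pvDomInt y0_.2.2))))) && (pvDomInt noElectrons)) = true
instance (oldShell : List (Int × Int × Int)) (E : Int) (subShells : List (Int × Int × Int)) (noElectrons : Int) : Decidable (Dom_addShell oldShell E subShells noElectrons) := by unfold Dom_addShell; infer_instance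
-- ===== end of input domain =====

-- B replaces A's tail recursion by an iterative "find first eligible subshell" loop (simpler decomposition);
-- both Pythons mutate oldShell in place the same way, the equivalence proved here is about the return value.


-- ===== PORT A =====
-- A's recursion always terminates: every recursive call appends an element of subShells not yet in
-- oldShell, so the depth is at most subShells.length + 1; the fuel parameter (= subShells.length + 1)
-- only makes this same computation total and the 0-fuel branch is never reached.
mutual
-- one Python invocation of addShell: the `if E >= noElectrons` test, then the for loop
def addShellGo (subShells : List (Int × Int × Int)) (noElectrons : Int) :
    Nat → List (Int × Int × Int) → Int → Option (List (Int × Int × Int))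
  | 0, _, _ => none
  | fuel + 1, oldShell, E =>
    if E ≥ noElectrons then some oldShell
    else addShellFor subShells noElectrons fuel oldShell E subShells
  termination_by f _ _ => (f, 0)
-- the `for subShell in subShells` loop, body exactly as in A (append, bump E, recurse, return)
def addShellFor (subShells : List (Int × Int × Int)) (noElectrons : Int)
    (fuel : Nat) (oldShell : List (Int × Int × Int)) (E : Int) :
    List (Int × Int × Int) → Option (List (Int × Int × Int))
  | [] => none
  | s :: rest =>
    if ¬ oldShell.contains s then
      if E + s.2.2 ≤ noElectrons then
        addShellGo subShells noElectrons fuel (oldShell ++ [s]) (E + s.2.2)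
      else addShellFor subShells noElectrons fuel oldShell E rest
    else addShellFor subShells noElectrons fuel oldShell E rest
  termination_by rem => (fuel, rem.length + 1)
end

def addShell (oldShell : List (Int × Int × Int)) (E : Int) (subShells : List (Int × Int × Int)) (noElectrons : Int) : Option (List (Int × Int × Int)) :=
  addShellGo subShells noElectrons (subShells.length + 1) oldShell E

-- ===== PORT B =====
-- B's while loop, ported with the same (always sufficient) fuel bound.
def addShellAltLoop (subShells : List (Int × Int × Int)) (noElectrons : Int) :
    Nat → List (Int × Int × Int) → Int → Option (List (Int × Int × Int))
  | 0, _, _ => none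
  | fuel + 1, oldShell, E =>
    if E < noElectrons then
      match subShells.find? (fun s => !oldShell.contains s && decide (E + s.2.2 ≤ noElectrons)) with
      | none => none
      | some s => addShellAltLoop subShells noElectrons fuel (oldShell ++ [s]) (E + s.2.2)
    else some oldShell

def addShell_alt (oldShell : List (Int × Int × Int)) (E : Int) (subShells : List (Int × Int × Int)) (noElectrons : Int) : Option (List (Int × Int × Int)) :=
  addShellAltLoop subShells noElectrons (subShells.length + 1) oldShell E

-- ===== PRECONDITION & SPEC =====
def Spec_addShell (oldShell : List (Int × Int × Int)) (E : Int) (subShells : List (Int × Int × Int)) (noElectrons : Int) (out : Option (List (Int × Int × Int))) : Prop := out = addShell_alt oldShell E subShells noElectrons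
instance (oldShell : List (Int × Int × Int)) (E : Int) (subShells : List (Int × Int × Int)) (noElectrons : Int) (out : Option (List (Int × Int × Int))) : Decidable (Spec_addShell oldShell E subShells noElectrons out) := by unfold Spec_addShell; infer_instance

-- ===== CLAIM (what is proved, stated in full; the proofs are below) =====
def Claim_equal_addShell : Prop := ∀ (oldShell : List (Int × Int × Int)) (E : Int) (subShells : List (Int × Int × Int)) (noElectrons : Int), Dom_addShell oldShell E subShells noElectrons → Spec_addShell oldShell E subShells noElectrons (addShell oldShell E subShells noElectrons)

-- ===== LEMMAS AND PROOFS =====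

-- A's for loop computes "first eligible subshell, then recurse" — B's step.
theorem addShellFor_eq_find (subShells : List (Int × Int × Int)) (noElectrons : Int)
    (fuel : Nat) (oldShell : List (Int × Int × Int)) (E : Int)
    (rem : List (Int × Int × Int)) :
    addShellFor subShells noElectrons fuel oldShell E rem =
      match rem.find? (fun s => !oldShell.contains s && decide (E + s.2.2 ≤ noElectrons)) with
      | none => none
      | some s => addShellGo subShells noElectrons fuel (oldShell ++ [s]) (E + s.2.2) := by
  induction rem with
  | nil => simp [addShellFor]
  | cons s rest ih =>
    by_cases hc : s ∈ oldShell
    · simp [addShellFor, hc, List.find?, ih]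
    · by_cases hE : E + s.2.2 ≤ noElectrons
      · simp [addShellFor, hc, hE, List.find?]
      · simp [addShellFor, hc, hE, List.find?, ih]

theorem addShellGo_eq_alt (subShells : List (Int × Int × Int)) (noElectrons : Int) :
    ∀ (fuel : Nat) (oldShell : List (Int × Int × Int)) (E : Int),
      addShellGo subShells noElectrons fuel oldShell E =
        addShellAltLoop subShells noElectrons fuel oldShell E := by
  intro fuel
  induction fuel with
  | zero => intro oldShell E; simp [addShellGo, addShellAltLoop]
  | succ f ih =>
    intro oldShell E
    by_cases h : E ≥ noElectrons
    · have h' : ¬ E < noElectrons := by omega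
      simp [addShellGo, addShellAltLoop, h, h']
    · have h' : E < noElectrons := by omega
      rw [addShellGo, addShellAltLoop]
      simp only [h, h', if_pos, ite_false]
      rw [addShellFor_eq_find]
      cases subShells.find? (fun s => !oldShell.contains s && decide (E + s.2.2 ≤ noElectrons)) with
      | none => rfl
      | some s => exact ih _ _

-- ===== VERDICT (by name: the statement is the Claim_ definition above) =====
theorem addShell_spec : Claim_equal_addShell := by
  intro oldShell E subShells noElectrons _
  unfold Spec_addShell addShell addShell_alt
  exact addShellGo_eq_alt subShells noElectrons _ oldShell E
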